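-- pv_equiv track=rewrite | github.com/Entropy-Foundation/smr-hydrangea | benchmark/benchmark/plot_moonshot_results.py | map_by
-- ===== SOURCE A (Python) =====
-- def map_by(map_of_arrays, level_1_keys_index, level_2_keys_index, remainder_start_index):
--     mapped = {}
--
--     for level_0_key, averages in map_of_arrays.items():
--         mapped[level_0_key] = {}
--
--         for configuration in averages:
--             level_1_key = configuration[level_1_keys_index]
--             level_2_key = configuration[level_2_keys_index]
--
--             if level_1_key not in mapped[level_0_key]:
--                 mapped[level_0_key][level_1_key] = {}
--
--             mapped[level_0_key][level_1_key][level_2_key] = configuration[remainder_start_index:]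
--
--     return mapped
-- ===== SOURCE B (Python) =====
-- def map_by(map_of_arrays, level_1_keys_index, level_2_keys_index, remainder_start_index):
--     return {
--         level_0_key: {
--             level_1_key: {
--                 c[level_2_keys_index]: c[remainder_start_index:]
--                 for c in averages
--                 if c[level_1_keys_index] == level_1_key
--             }
--             for level_1_key in dict.fromkeys(c[level_1_keys_index] for c in averages)
--         }
--         for level_0_key, averages in map_of_arrays.items()
--     }
-- ===== Notes on version B (the rewrite author's own statement) =====
-- stated objective: alternative
-- what changed: Replaces the single lazy-creation mutation pass with a nested dict comprehension: per level_0 key it first computes the distinct level_1 keys via dict.fromkeys and then rescans averages once per level_1 key to collect the level_2 dictionary.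
import Mathlib
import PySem

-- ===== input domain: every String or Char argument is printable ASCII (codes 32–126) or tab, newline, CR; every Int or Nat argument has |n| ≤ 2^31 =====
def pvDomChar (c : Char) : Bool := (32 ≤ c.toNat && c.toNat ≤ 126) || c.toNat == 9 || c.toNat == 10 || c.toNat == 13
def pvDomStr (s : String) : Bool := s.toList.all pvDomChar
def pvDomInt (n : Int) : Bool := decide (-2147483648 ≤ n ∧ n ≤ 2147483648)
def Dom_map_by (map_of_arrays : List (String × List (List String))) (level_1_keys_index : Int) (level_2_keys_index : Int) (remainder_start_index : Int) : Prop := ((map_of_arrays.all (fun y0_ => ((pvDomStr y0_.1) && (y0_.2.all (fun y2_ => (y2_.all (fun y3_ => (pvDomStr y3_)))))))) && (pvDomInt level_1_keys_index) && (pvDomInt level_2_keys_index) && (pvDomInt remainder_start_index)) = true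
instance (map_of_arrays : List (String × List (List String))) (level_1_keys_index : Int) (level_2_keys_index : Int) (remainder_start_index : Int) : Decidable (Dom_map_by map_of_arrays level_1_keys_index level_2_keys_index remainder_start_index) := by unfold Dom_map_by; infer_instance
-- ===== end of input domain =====

-- B replaces A's single lazy-creation mutation pass by a nested dict comprehension (distinct level_1
-- keys first, then one rescan of averages per level_1 key): an alternative decomposition, not faster.

-- shared primitives: c[i] (IndexError excluded by Pre_) and c[r:]
def pvIdx (c : List String) (i : Int) : String := (PySem.List.pyGet? c i).getD ""
def pvRem (c : List String) (r : Int) : List String := PySem.List.slice c (some r) none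

-- ===== PORT A =====
-- body of A's inner 'for configuration in averages' loop, acting on the dict mapped[level_0_key]
def pvStepA (i1 i2 r : Int) (d : PySem.Dict String (PySem.Dict String (List String))) (c : List String) : PySem.Dict String (PySem.Dict String (List String)) :=
  let l1 := pvIdx c i1
  let l2 := pvIdx c i2
  -- 'if level_1_key not in mapped[level_0_key]: mapped[level_0_key][level_1_key] = {}'
  let d' := if d.contains l1 then d else d.insert l1 PySem.Dict.empty
  -- 'mapped[level_0_key][level_1_key][level_2_key] = configuration[remainder_start_index:]'
  d'.insert l1 ((d'.getD l1 PySem.Dict.empty).insert l2 (pvRem c r))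

def map_by (map_of_arrays : List (String × List (List String))) (level_1_keys_index : Int) (level_2_keys_index : Int) (remainder_start_index : Int) : List (String × List (String × List (String × List String))) :=
  ((map_of_arrays.foldl (fun mapped p =>
      mapped.insert p.1 (p.2.foldl (pvStepA level_1_keys_index level_2_keys_index remainder_start_index) PySem.Dict.empty))
    PySem.Dict.empty).items).map (fun p => (p.1, p.2.items.map (fun q => (q.1, q.2.items))))

-- ===== PORT B =====
-- '{c[i2]: c[r:] for c in averages if c[i1] == l1}' for each l1 in dict.fromkeys(c[i1] for c in averages)
def mapByAltInner (avgs : List (List String)) (i1 i2 r : Int) : List (String × List (String × List String)) :=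
  (PySem.List.dedup (avgs.map (fun c => pvIdx c i1))).map (fun l1 =>
    (l1, ((avgs.filter (fun c => pvIdx c i1 == l1)).foldl
            (fun d c => d.insert (pvIdx c i2) (pvRem c r)) PySem.Dict.empty).items))

def map_by_alt (map_of_arrays : List (String × List (List String))) (level_1_keys_index : Int) (level_2_keys_index : Int) (remainder_start_index : Int) : List (String × List (String × List (String × List String))) :=
  (map_of_arrays.foldl (fun od p =>
      od.insert p.1 (mapByAltInner p.2 level_1_keys_index level_2_keys_index remainder_start_index))
    PySem.Dict.empty).items

-- ===== PRECONDITION & SPEC =====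
-- Pre_ excludes exactly the inputs where A raises IndexError: some configuration for which
-- configuration[level_1_keys_index] or configuration[level_2_keys_index] is out of range.
def Pre_map_by (map_of_arrays : List (String × List (List String))) (level_1_keys_index : Int) (level_2_keys_index : Int) (remainder_start_index : Int) : Prop :=
  ∀ p ∈ map_of_arrays, ∀ c ∈ p.2, PySem.Raise.InRange c.length level_1_keys_index ∧ PySem.Raise.InRange c.length level_2_keys_index

instance (map_of_arrays : List (String × List (List String))) (level_1_keys_index : Int) (level_2_keys_index : Int) (remainder_start_index : Int) : Decidable (Pre_map_by map_of_arrays level_1_keys_index level_2_keys_index remainder_start_index) := by unfold Pre_map_by; infer_instance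

def pvWitness_map_by : (List (String × List (List String))) × Int × Int × Int :=
  ([("a", [["x", "y", "z"], ["x", "w", "q"], ["u", "y", "r"]])], 0, 1, 2)

def Spec_map_by (map_of_arrays : List (String × List (List String))) (level_1_keys_index : Int) (level_2_keys_index : Int) (remainder_start_index : Int) (out : List (String × List (String × List (String × List String)))) : Prop := out = map_by_alt map_of_arrays level_1_keys_index level_2_keys_index remainder_start_index
instance (map_of_arrays : List (String × List (List String))) (level_1_keys_index : Int) (level_2_keys_index : Int) (remainder_start_index : Int) (out : List (String × List (String × List (String × List String)))) : Decidable (Spec_map_by map_of_arrays level_1_keys_index level_2_keys_index remainder_start_index out) := by unfold Spec_map_by; infer_instance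

-- ===== CLAIM (what is proved, stated in full; the proofs are below) =====
def Claim_equal_map_by : Prop := ∀ (map_of_arrays : List (String × List (List String))) (level_1_keys_index : Int) (level_2_keys_index : Int) (remainder_start_index : Int), Dom_map_by map_of_arrays level_1_keys_index level_2_keys_index remainder_start_index → Pre_map_by map_of_arrays level_1_keys_index level_2_keys_index remainder_start_index → Spec_map_by map_of_arrays level_1_keys_index level_2_keys_index remainder_start_index (map_by map_of_arrays level_1_keys_index level_2_keys_index remainder_start_index)

-- ===== LEMMAS AND PROOFS =====

theorem pv_dedup_append (xs : List String) (x : String) :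
    PySem.List.dedup (xs ++ [x]) = if x ∈ xs then PySem.List.dedup xs else PySem.List.dedup xs ++ [x] := by
  have h1 : PySem.List.dedup (xs ++ [x]) = PySem.Set.add (PySem.List.dedup xs) x := by
    simp [PySem.List.dedup_eq_ofList, PySem.Set.ofList_eq_foldl, List.foldl_append]
  rw [h1, PySem.Set.add]
  by_cases hx : x ∈ xs <;> simp [PySem.Set.contains, hx]

theorem pv_keys_rel {κ γ δ : Type} [BEq κ] (dA : PySem.Dict κ γ) (dB : PySem.Dict κ δ) (h : γ → δ)
    (hrel : dB.items = dA.items.map (fun p => (p.1, h p.2))) : dB.keys = dA.keys := by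
  simp only [PySem.Dict.keys, hrel, List.map_map]
  rfl

theorem pv_insert_rel {κ γ δ : Type} [BEq κ] [LawfulBEq κ] [DecidableEq κ]
    (dA : PySem.Dict κ γ) (dB : PySem.Dict κ δ)
    (h : γ → δ) (k : κ) (v : γ)
    (hrel : dB.items = dA.items.map (fun p => (p.1, h p.2))) :
    (dB.insert k (h v)).items = (dA.insert k v).items.map (fun p => (p.1, h p.2)) := by
  have hc : dB.contains k = dA.contains k := by
    rw [PySem.Dict.contains_eq_decide_mem_keys, PySem.Dict.contains_eq_decide_mem_keys,
        pv_keys_rel dA dB h hrel]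
  rw [PySem.Dict.items_insert, PySem.Dict.items_insert, hc]
  by_cases hk : dA.contains k = true
  · simp only [hk, if_pos, hrel, List.map_map]
    refine List.map_congr_left (fun p _ => ?_)
    by_cases hp : p.1 = k <;> simp [hp]
  · simp only [hk, if_neg, Bool.not_eq_true, hrel, List.map_append]
    simp

theorem pv_foldl_insert_rel {κ β γ δ : Type} [BEq κ] [LawfulBEq κ] [DecidableEq κ]
    (h : γ → δ) (g : β → γ) :
    ∀ (l : List (κ × β)) (dA : PySem.Dict κ γ) (dB : PySem.Dict κ δ),
    dB.items = dA.items.map (fun p => (p.1, h p.2)) →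
    (l.foldl (fun d p => d.insert p.1 (h (g p.2))) dB).items
      = ((l.foldl (fun d p => d.insert p.1 (g p.2)) dA).items).map (fun p => (p.1, h p.2))
  | [], dA, dB, hrel => hrel
  | p :: t, dA, dB, hrel => by
    simp only [List.foldl_cons]
    exact pv_foldl_insert_rel h g t _ _ (pv_insert_rel dA dB h p.1 (g p.2) hrel)

-- the heart: A's inner fold, as an items list, is B's first-appearance-keys/filter form
theorem pv_inner (i1 i2 r : Int) (avgs : List (List String)) :
    (avgs.foldl (pvStepA i1 i2 r) PySem.Dict.empty).items
      = (PySem.List.dedup (avgs.map (fun c => pvIdx c i1))).map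
          (fun l1 => (l1, (avgs.filter (fun c => pvIdx c i1 == l1)).foldl
              (fun d c => d.insert (pvIdx c i2) (pvRem c r)) PySem.Dict.empty)) := by
  induction avgs using List.reverseRecOn with
  | nil => rfl
  | append_singleton as c ih =>
    rw [List.foldl_append, List.foldl_cons, List.foldl_nil]
    set d := as.foldl (pvStepA i1 i2 r) PySem.Dict.empty with hd
    set ks := PySem.List.dedup (as.map (fun c => pvIdx c i1)) with hks
    set F : String → PySem.Dict String (List String) :=
      fun l1 => (as.filter (fun c => pvIdx c i1 == l1)).foldl
        (fun d c => d.insert (pvIdx c i2) (pvRem c r)) PySem.Dict.empty with hF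
    have hkeys : d.keys = ks := by
      simp only [PySem.Dict.keys, ih, List.map_map]
      exact List.map_id' ks
    have hnd : d.keys.Nodup := by rw [hkeys]; exact PySem.List.nodup_dedup _
    rw [List.map_append, List.map_cons, List.map_nil, pv_dedup_append]
    by_cases hx : pvIdx c i1 ∈ as.map (fun c => pvIdx c i1)
    · -- level_1 key already present
      have hmemks : pvIdx c i1 ∈ ks := by rw [hks]; exact (PySem.List.mem_dedup _ _).mpr hx
      have hcont : d.contains (pvIdx c i1) = true := by
        rw [PySem.Dict.contains_eq_decide_mem_keys, hkeys]
        exact decide_eq_true hmemks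
      have hgetD : d.getD (pvIdx c i1) PySem.Dict.empty = F (pvIdx c i1) := by
        exact PySem.Dict.getD_of_mem_items d (by rw [ih]; exact List.mem_map_of_mem hmemks) hnd _
      rw [if_pos hx]
      simp only [pvStepA, hcont, if_true, hgetD]
      rw [PySem.Dict.items_insert_of_contains _ _ hcont, ih, List.map_map]
      refine List.map_congr_left (fun l1 hl1 => ?_)
      by_cases hlg : l1 = pvIdx c i1
      · subst hlg
        simp [List.filter_append, List.foldl_append]
        rw [hF]
      · have : (l1 == pvIdx c i1) = false := by simpa using hlg
        simp only [Function.comp_apply, this]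
        have hfe : (pvIdx c i1 == l1) = false := by simpa using (Ne.symm hlg)
        simp [List.filter_append, hfe]
    · -- fresh level_1 key: appended at the end
      have hcont : d.contains (pvIdx c i1) = false := by
        rw [PySem.Dict.contains_eq_decide_mem_keys, hkeys]
        exact decide_eq_false (fun h => hx ((PySem.List.mem_dedup _ _).mp h))
      rw [if_neg hx]
      simp only [pvStepA, hcont, Bool.false_eq_true, if_false,
        PySem.Dict.getD_insert_self, PySem.Dict.insert_insert_self]
      rw [PySem.Dict.items_insert_of_not_contains _ _ hcont, ih, List.map_append, List.map_cons, List.map_nil]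
      congr 1
      · refine List.map_congr_left (fun l1 hl1 => ?_)
        have hne : pvIdx c i1 ≠ l1 := by
          intro h; apply hx
          rw [h]
          exact (PySem.List.mem_dedup _ _).mp (hks ▸ hl1)
        have hfe : (pvIdx c i1 == l1) = false := by simpa using hne
        simp [List.filter_append, hfe]
      · have hnil : as.filter (fun c' => pvIdx c' i1 == pvIdx c i1) = [] := by
          rw [List.filter_eq_nil_iff]
          intro a ha he
          rw [beq_iff_eq] at he
          exact hx (he ▸ List.mem_map_of_mem ha)
        simp [List.filter_append, hnil]

theorem pv_inner_alt (i1 i2 r : Int) (avgs : List (List String)) :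
    mapByAltInner avgs i1 i2 r
      = (avgs.foldl (pvStepA i1 i2 r) PySem.Dict.empty).items.map (fun q => (q.1, q.2.items)) := by
  rw [pv_inner, List.map_map, mapByAltInner]
  rfl

-- ===== VERDICT (by name: the statement is the Claim_ definition above) =====
theorem map_by_spec : Claim_equal_map_by := by
  intro m i1 i2 r _hdom _hpre
  unfold Spec_map_by map_by map_by_alt
  have hfun : (fun (od : PySem.Dict String (List (String × List (String × List String)))) (p : String × List (List String)) =>
      od.insert p.1 (mapByAltInner p.2 i1 i2 r))
      = (fun od p => od.insert p.1
          ((fun d2 : PySem.Dict String (PySem.Dict String (List String)) =>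
              d2.items.map (fun q => (q.1, q.2.items))) (p.2.foldl (pvStepA i1 i2 r) PySem.Dict.empty))) := by
    funext od p
    rw [pv_inner_alt]
  rw [hfun]
  exact (pv_foldl_insert_rel
    (h := fun d2 : PySem.Dict String (PySem.Dict String (List String)) => d2.items.map (fun q => (q.1, q.2.items)))
    (g := fun avgs => avgs.foldl (pvStepA i1 i2 r) PySem.Dict.empty)
    m PySem.Dict.empty PySem.Dict.empty rfl).symm
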